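-- pv_equiv track=rewrite | github.com/HtetAungShine6/Data-Structures-and-Algorithm | Final_DSA/DSA_Week8/Conversion.py | postfix_to_prefix
-- ===== SOURCE A (Python) =====
-- def is_operator(char):
--     return char in '+-*/^'
--
-- def postfix_to_prefix(expression):
--     stack = []
--     for char in expression:
--         if not is_operator(char):
--             stack.append(char)
--         else:
--             operand2 = stack.pop()
--             operand1 = stack.pop()
--             stack.append(char + operand1 + operand2)
--     return stack.pop()
-- ===== SOURCE B (Python) =====
-- def is_operator(char):
--     return char in '+-*/^'
--
-- def postfix_to_prefix(expression):
--     # recursive descent from the end: parse(i) reads the expression ending at index i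
--     def parse(i):
--         if i < 0:
--             raise IndexError("pop from empty stack")
--         char = expression[i]
--         if is_operator(char):
--             right, i = parse(i - 1)
--             left, i = parse(i)
--             return char + left + right, i
--         return char, i - 1
--
--     result, _ = parse(len(expression) - 1)
--     return result
-- ===== Notes on version B (the rewrite author's own statement) =====
-- stated objective: alternative
-- what changed: Replaces A's left-to-right explicit-stack evaluation with a right-to-left recursive-descent parser (read the operator, then recursively its right and left operands from the end of the string).
import Mathlib
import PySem

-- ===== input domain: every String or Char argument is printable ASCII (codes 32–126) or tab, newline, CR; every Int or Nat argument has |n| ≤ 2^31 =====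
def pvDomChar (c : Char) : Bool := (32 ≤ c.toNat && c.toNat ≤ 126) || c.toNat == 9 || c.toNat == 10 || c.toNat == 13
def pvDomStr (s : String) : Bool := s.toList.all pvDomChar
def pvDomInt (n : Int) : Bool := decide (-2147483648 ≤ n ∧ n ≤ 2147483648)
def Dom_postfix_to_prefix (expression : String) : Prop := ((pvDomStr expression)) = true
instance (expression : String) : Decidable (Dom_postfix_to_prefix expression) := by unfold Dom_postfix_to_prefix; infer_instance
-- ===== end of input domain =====

-- B replaces A's explicit stack loop with a recursive-descent parse from the end of the
-- string (different decomposition, same cost); proved equal on Pre_, the inputs where A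
-- returns without raising.

-- ===== PORT A =====
-- helper: char in '+-*/^'
def is_operator (char : Char) : Bool := "+-*/^".toList.contains char

-- A's loop over the chars: stack with top at the head; 'none' marks Python's
-- IndexError (pop from an empty/short stack).
def pvRunA (stack : List String) (cs : List Char) : Option (List String) :=
  match cs with
  | [] => some stack
  | c :: rest =>
    if is_operator c = false then
      pvRunA (c.toString :: stack) rest
    else
      match stack with
      | operand2 :: operand1 :: st => pvRunA ((c.toString ++ operand1 ++ operand2) :: st) rest
      | _ => none

def postfix_to_prefix (expression : String) : String :=
  match pvRunA [] expression.toList with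
  | some (top :: _) => top          -- final stack.pop()
  | _ => ""                         -- Python raises IndexError here (excluded by Pre_)

-- ===== PORT B =====
-- Source B's parse(i), reading the string backwards: the reversed char list plays the
-- descending index i; the subtype proof only certifies that parse consumes at least one
-- character (termination guard); 'none' marks Source B's IndexError (i < 0).
def pvParseBAux : (cs : List Char) → Option {p : String × List Char // p.2.length < cs.length}
  | [] => none
  | char :: rest =>
    if is_operator char then
      match pvParseBAux rest with
      | some ⟨(right, rest1), h1⟩ =>
        match pvParseBAux rest1 with
        | some ⟨(left, rest2), h2⟩ =>
          some ⟨(char.toString ++ left ++ right, rest2), by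
            have a1 : rest1.length < rest.length := h1
            have a2 : rest2.length < rest1.length := h2
            simp only [List.length_cons]; omega⟩
        | none => none
      | none => none
    else
      some ⟨(char.toString, rest), by simp⟩
termination_by cs => cs.length
decreasing_by
  · simp
  · have a1 : rest1.length < rest.length := h1
    simp only [List.length_cons]; omega

def pvParseB (cs : List Char) : Option (String × List Char) :=
  (pvParseBAux cs).map Subtype.val

def postfix_to_prefix_alt (expression : String) : String :=
  match pvParseB expression.toList.reverse with
  | some (result, _) => result
  | none => ""                      -- Python raises IndexError here (excluded by Pre_)

-- ===== PRECONDITION & SPEC =====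
-- token weight: operand +1, operator -1 (net effect on A's stack size)
def pvW (c : Char) : Int := if is_operator c then -1 else 1
def pvBal (l : List Char) : Int := (l.map pvW).sum

-- Pre_ excludes exactly the inputs on which A raises IndexError (an operator meeting
-- fewer than two stacked operands, or the final pop from an empty stack).
def Pre_postfix_to_prefix (expression : String) : Prop :=
  (∀ i, (h : i < expression.toList.length) →
      is_operator (expression.toList[i]'h) = true →
      2 ≤ pvBal (expression.toList.take i)) ∧
  1 ≤ pvBal expression.toList
instance (expression : String) : Decidable (Pre_postfix_to_prefix expression) := by
  unfold Pre_postfix_to_prefix; infer_instance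

def pvWitness_postfix_to_prefix : String := "ab+c*"

def Spec_postfix_to_prefix (expression : String) (out : String) : Prop := out = postfix_to_prefix_alt expression
instance (expression : String) (out : String) : Decidable (Spec_postfix_to_prefix expression out) := by unfold Spec_postfix_to_prefix; infer_instance

-- ===== CLAIM (what is proved, stated in full; the proofs are below) =====
def Claim_equal_postfix_to_prefix : Prop := ∀ (expression : String), Dom_postfix_to_prefix expression → Pre_postfix_to_prefix expression → Spec_postfix_to_prefix expression (postfix_to_prefix expression)

-- ===== LEMMAS AND PROOFS =====

theorem pvBal_nil : pvBal [] = 0 := rfl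

theorem pvBal_cons (c : Char) (l : List Char) : pvBal (c :: l) = pvW c + pvBal l := by
  simp [pvBal]

theorem pvParseB_operand (c : Char) (l : List Char) (h : is_operator c = false) :
    pvParseB (c :: l) = some (c.toString, l) := by
  unfold pvParseB
  rw [pvParseBAux]
  simp [h]

theorem pvParseB_operator (c : Char) (l l2 l3 : List Char) (o1 o2 : String)
    (hc : is_operator c = true)
    (h2 : pvParseB l = some (o2, l2)) (h1 : pvParseB l2 = some (o1, l3)) :
    pvParseB (c :: l) = some (c.toString ++ o1 ++ o2, l3) := by
  unfold pvParseB at h2 h1 ⊢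
  cases ha : pvParseBAux l with
  | none => rw [ha] at h2; simp at h2
  | some v =>
    obtain ⟨⟨r, r1⟩, hrlt⟩ := v
    rw [ha] at h2
    simp at h2
    obtain ⟨hro, hr1⟩ := h2
    subst hro; subst hr1
    cases hb : pvParseBAux r1 with
    | none => rw [hb] at h1; simp at h1
    | some w =>
      obtain ⟨⟨lf, r2⟩, hllt⟩ := w
      rw [hb] at h1
      simp at h1
      obtain ⟨hlo, hr2⟩ := h1
      subst hlo; subst hr2
      rw [pvParseBAux]
      simp [hc, ha, hb]

-- unfolding lemma for A's loop step
theorem pvRunA_cons (st : List String) (c : Char) (rest : List Char) :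
    pvRunA st (c :: rest) =
      if is_operator c = false then pvRunA (c.toString :: st) rest
      else
        match st with
        | operand2 :: operand1 :: stt => pvRunA ((c.toString ++ operand1 ++ operand2) :: stt) rest
        | _ => none := rfl

-- the stack-contents invariant: each stack entry (top first) is what B's parser returns
-- on the reversed processed prefix, chained through the remainders
def pvRepr : List String → List Char → Prop
  | [], _ => True
  | t :: st, l => ∃ l2, pvParseB l = some (t, l2) ∧ pvRepr st l2

theorem pvRunA_inv (cs : List Char) : ∀ (st : List String) (l : List Char) (st' : List String),
    pvRunA st cs = some st' → pvRepr st l → pvRepr st' (cs.reverse ++ l) := by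
  induction cs with
  | nil =>
    intro st l st' hrun hrep
    simp [pvRunA] at hrun
    subst hrun
    simpa using hrep
  | cons c rest ih =>
    intro st l st' hrun hrep
    cases hx : is_operator c with
    | false =>
      rw [pvRunA_cons, if_pos hx] at hrun
      have hrep' : pvRepr (c.toString :: st) (c :: l) :=
        ⟨l, pvParseB_operand c l hx, hrep⟩
      have := ih _ _ _ hrun hrep'
      simpa [List.append_assoc] using this
    | true =>
      rw [pvRunA_cons, if_neg (by simp [hx])] at hrun
      rcases st with _ | ⟨o2, _ | ⟨o1, stt⟩⟩
      · simp at hrun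
      · simp at hrun
      · obtain ⟨l2, hp2, l3, hp1, hrest⟩ := hrep
        have hrep' : pvRepr ((c.toString ++ o1 ++ o2) :: stt) (c :: l) :=
          ⟨l3, pvParseB_operator c l l2 l3 o1 o2 hx hp2 hp1, hrest⟩
        have := ih _ _ _ hrun hrep'
        simpa [List.append_assoc] using this

theorem pvRunA_success (cs : List Char) : ∀ (st : List String),
    (∀ i, (h : i < cs.length) → is_operator (cs[i]'h) = true →
        2 ≤ (st.length : Int) + pvBal (cs.take i)) →
    ∃ st', pvRunA st cs = some st' ∧ (st'.length : Int) = st.length + pvBal cs := by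
  induction cs with
  | nil =>
    intro st _
    exact ⟨st, by simp [pvRunA, pvBal_nil]⟩
  | cons c rest ih =>
    intro st hcond
    cases hx : is_operator c with
    | false =>
      have hw : pvW c = 1 := by simp [pvW, hx]
      have hcond' : ∀ i, (h : i < rest.length) → is_operator (rest[i]'h) = true →
          2 ≤ ((c.toString :: st).length : Int) + pvBal (rest.take i) := by
        intro i h hop
        have := hcond (i + 1) (by simpa using Nat.succ_lt_succ h) (by simpa using hop)
        rw [List.take_succ_cons, pvBal_cons, hw] at this
        simp only [List.length_cons]
        push_cast at this ⊢
        omega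
      obtain ⟨st', h1, h2⟩ := ih _ hcond'
      refine ⟨st', ?_, ?_⟩
      · rw [pvRunA_cons, if_pos hx]; exact h1
      · rw [pvBal_cons, hw]
        simp only [List.length_cons] at h2
        push_cast at h2 ⊢
        omega
    | true =>
      have hw : pvW c = -1 := by simp [pvW, hx]
      have hlen : 2 ≤ (st.length : Int) := by
        have := hcond 0 (by simp) (by simpa using hx)
        simpa [pvBal_nil] using this
      rcases st with _ | ⟨o2, _ | ⟨o1, stt⟩⟩
      · simp at hlen
      · simp at hlen
      · have hcond' : ∀ i, (h : i < rest.length) → is_operator (rest[i]'h) = true →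
            2 ≤ (((c.toString ++ o1 ++ o2) :: stt).length : Int) + pvBal (rest.take i) := by
          intro i h hop
          have := hcond (i + 1) (by simpa using Nat.succ_lt_succ h) (by simpa using hop)
          rw [List.take_succ_cons, pvBal_cons, hw] at this
          simp only [List.length_cons] at this ⊢
          push_cast at this ⊢
          omega
        obtain ⟨st', h1, h2⟩ := ih _ hcond'
        refine ⟨st', ?_, ?_⟩
        · rw [pvRunA_cons, if_neg (by simp [hx])]
          exact h1
        · rw [pvBal_cons, hw]
          simp only [List.length_cons] at h2 ⊢
          push_cast at h2 ⊢
          omega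

-- ===== VERDICT (by name: the statement is the Claim_ definition above) =====
theorem postfix_to_prefix_spec : Claim_equal_postfix_to_prefix := by
  intro expression _hdom hpre
  obtain ⟨h1, h2⟩ := hpre
  obtain ⟨st', hrun, hlen⟩ := pvRunA_success expression.toList []
    (by intro i h hop; simpa using h1 i h hop)
  rcases st' with _ | ⟨t, strest⟩
  · simp at hlen
    omega
  · have hrep := pvRunA_inv expression.toList [] [] _ hrun trivial
    obtain ⟨l2, hp, -⟩ := hrep
    simp only [List.append_nil] at hp
    unfold Spec_postfix_to_prefix postfix_to_prefix postfix_to_prefix_alt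
    rw [hrun, hp]
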